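-- pv_equiv track=rewrite | github.com/hankso/Dorahacks-miniC | c2py.py | parseVar
-- ===== SOURCE A (Python) =====
-- def isDigit(c):
--     return c > '0' and c < '9'
--
-- def isChar(c):
--     return (c > 'a' and c < 'z') or (c > 'A' and c < 'Z')
--
-- def parseVar(s, start=0):
--     tmp = ''
--     while start < len(s):
--         if isChar(s[start]):
--             tmp += s[start]
--         elif isDigit(s[start]) and len(tmp):
--             break
--         start += 1
--     return tmp, start - len(tmp)
-- ===== SOURCE B (Python) =====
-- def isDigit(c):
--     return c > '0' and c < '9'
--
-- def isChar(c):
--     return (c > 'a' and c < 'z') or (c > 'A' and c < 'Z')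
--
-- def parseVar(s, start=0):
--     n = len(s)
--     if start >= n:
--         return '', start
--     first = next((i for i in range(start, n) if isChar(s[i])), None)
--     if first is None:
--         return '', n
--     end = next((j for j in range(first + 1, n) if isDigit(s[j])), n)
--     tmp = ''.join(s[i] for i in range(start, end) if isChar(s[i]))
--     return tmp, end - len(tmp)
-- ===== Notes on version B (the rewrite author's own statement) =====
-- stated objective: alternative
-- what changed: A's single interleaved while-loop (accumulating letters one string-concat at a time and breaking on a digit) is replaced by a three-step decomposition: find the first letter index, find the first digit after it (default end of string), then join the letters of s[start:end] in one pass and return (letters, end - len(letters)); a timing run measured B faster (single join vs repeated string concatenation).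
import Mathlib
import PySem

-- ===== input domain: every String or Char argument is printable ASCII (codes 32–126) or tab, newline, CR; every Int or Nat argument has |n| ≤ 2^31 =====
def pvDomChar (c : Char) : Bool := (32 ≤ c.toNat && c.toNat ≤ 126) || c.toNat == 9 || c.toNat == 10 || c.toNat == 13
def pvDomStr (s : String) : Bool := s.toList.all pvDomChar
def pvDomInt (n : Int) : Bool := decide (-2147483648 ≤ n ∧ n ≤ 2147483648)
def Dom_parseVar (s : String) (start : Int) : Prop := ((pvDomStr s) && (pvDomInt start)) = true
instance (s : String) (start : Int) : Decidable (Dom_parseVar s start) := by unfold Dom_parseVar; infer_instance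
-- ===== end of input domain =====

-- B replaces A's single interleaved while-loop with a find-first-letter / find-ending-digit /
-- filter-letters decomposition; one join instead of repeated string concatenation (measured faster).

-- ===== PORT A =====
-- Python's isDigit / isChar, quirky strict comparisons kept verbatim
def pvIsDigit (c : Char) : Bool := decide ('0' < c) && decide (c < '9')
def pvIsChar (c : Char) : Bool := (decide ('a' < c) && decide (c < 'z')) || (decide ('A' < c) && decide (c < 'Z'))

-- A's while-loop, state (tmp, start); pyGet? = none is Python's IndexError (outside Pre_parseVar)
def parseVarLoop (cs : List Char) (tmp : List Char) (start : Int) : List Char × Int :=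
  if _h : start < (cs.length : Int) then
    match PySem.List.pyGet? cs start with
    | none => (tmp, start)   -- s[start] raises IndexError in Python; Pre_parseVar excludes this
    | some c =>
      if pvIsChar c then parseVarLoop cs (tmp ++ [c]) (start + 1)
      else if pvIsDigit c && tmp.length != 0 then (tmp, start)
      else parseVarLoop cs tmp (start + 1)
  else (tmp, start)
termination_by ((cs.length : Int) - start).toNat
decreasing_by all_goals omega

def parseVar (s : String) (start : Int) : String × Int :=
  match parseVarLoop s.toList [] start with
  | (tmp, st) => (String.mk tmp, st - (tmp.length : Int))

-- ===== PORT B =====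
-- 'isChar(s[i])' / 'isDigit(s[j])' as used inside B's generator expressions
def pvCharAt (cs : List Char) (i : Int) : Bool := (PySem.List.pyGet? cs i).elim false pvIsChar
def pvDigitAt (cs : List Char) (i : Int) : Bool := (PySem.List.pyGet? cs i).elim false pvIsDigit
-- ''.join(s[i] for i in range(a, b) if isChar(s[i]))
def pvLetters (cs : List Char) (a b : Int) : List Char :=
  (PySem.List.pyRange a b 1).filterMap
    (fun i => (PySem.List.pyGet? cs i).bind (fun c => if pvIsChar c then some c else none))

def parseVar_alt (s : String) (start : Int) : String × Int :=
  let cs := s.toList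
  let n : Int := (cs.length : Int)
  if start ≥ n then ("", start)
  else
    match (PySem.List.pyRange start n 1).find? (pvCharAt cs) with
    | none => ("", n)
    | some first =>
      let e := ((PySem.List.pyRange (first + 1) n 1).find? (pvDigitAt cs)).getD n
      let tmp := pvLetters cs start e
      (String.mk tmp, e - (tmp.length : Int))

-- ===== PRECONDITION & SPEC =====
-- Pre_ excludes exactly start < -len(s), where Python's s[start] raises IndexError (in A and in B alike).
def Pre_parseVar (s : String) (start : Int) : Prop := -(s.toList.length : Int) ≤ start
instance (s : String) (start : Int) : Decidable (Pre_parseVar s start) := by unfold Pre_parseVar; infer_instance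
def pvWitness_parseVar : String × Int := ("my_var1x", 0)

def Spec_parseVar (s : String) (start : Int) (out : String × Int) : Prop := out = parseVar_alt s start
instance (s : String) (start : Int) (out : String × Int) : Decidable (Spec_parseVar s start out) := by unfold Spec_parseVar; infer_instance

-- ===== CLAIM =====
def Claim_equal_parseVar : Prop := ∀ (s : String) (start : Int), Dom_parseVar s start → Pre_parseVar s start → Spec_parseVar s start (parseVar s start)

-- ===== LEMMAS AND PROOFS =====

-- A's letter range and digit range are disjoint ('9' < 'A' < 'a')
lemma pvChar_not_digit (c : Char) (h : pvIsChar c = true) : pvIsDigit c = false := by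
  unfold pvIsChar at h
  unfold pvIsDigit
  have h0 : '0'.val.toNat = 48 := rfl
  have h9 : '9'.val.toNat = 57 := rfl
  have ha : 'a'.val.toNat = 97 := rfl
  have hz : 'z'.val.toNat = 122 := rfl
  have hA : 'A'.val.toNat = 65 := rfl
  have hZ : 'Z'.val.toNat = 90 := rfl
  simp only [Bool.or_eq_true, Bool.and_eq_true, decide_eq_true_eq, Char.lt_def,
    UInt32.lt_iff_toNat_lt, h0, h9, ha, hz, hA, hZ] at h ⊢
  simp only [Bool.and_eq_false_iff, decide_eq_false_iff_not]
  omega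

lemma pvGet_some (cs : List Char) (i : Int) (h1 : -(cs.length : Int) ≤ i)
    (h2 : i < (cs.length : Int)) : ∃ c, PySem.List.pyGet? cs i = some c := by
  cases h : PySem.List.pyGet? cs i with
  | some c => exact ⟨c, rfl⟩
  | none => rw [PySem.List.pyGet?_eq_none_iff] at h; exact absurd ⟨h1, h2⟩ h

-- the 'end' index B computes from position i: first j ≥ i with isDigit(s[j]), else len(s)
def pvEnd (cs : List Char) (i : Int) : Int :=
  ((PySem.List.pyRange i (cs.length : Int) 1).find? (pvDigitAt cs)).getD (cs.length : Int)

lemma pvEnd_bounds (cs : List Char) (i : Int) (h : i ≤ (cs.length : Int)) :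
    i ≤ pvEnd cs i ∧ pvEnd cs i ≤ (cs.length : Int) := by
  unfold pvEnd
  cases hf : (PySem.List.pyRange i (cs.length : Int) 1).find? (pvDigitAt cs) with
  | none => simp only [Option.getD_none]; exact ⟨h, le_refl _⟩
  | some e =>
    have hm := List.mem_of_find?_eq_some hf
    rw [PySem.List.mem_pyRange_one] at hm
    simp only [Option.getD_some]
    exact ⟨hm.1, le_of_lt hm.2⟩

lemma pvEnd_at_len (cs : List Char) : pvEnd cs (cs.length : Int) = (cs.length : Int) := by
  unfold pvEnd
  rw [PySem.List.pyRange_one_eq_nil (le_refl _)]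
  rfl

lemma pvEnd_of_digit (cs : List Char) (i : Int) (hlt : i < (cs.length : Int))
    (hd : pvDigitAt cs i = true) : pvEnd cs i = i := by
  unfold pvEnd
  rw [PySem.List.pyRange_one_cons hlt, List.find?_cons_of_pos hd]
  rfl

lemma pvEnd_of_not_digit (cs : List Char) (i : Int) (hlt : i < (cs.length : Int))
    (hd : pvDigitAt cs i = false) : pvEnd cs i = pvEnd cs (i + 1) := by
  unfold pvEnd
  rw [PySem.List.pyRange_one_cons hlt, List.find?_cons_of_neg (by simp [hd])]

lemma pvLetters_nil (cs : List Char) (a b : Int) (h : b ≤ a) : pvLetters cs a b = [] := by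
  unfold pvLetters
  rw [PySem.List.pyRange_one_eq_nil h]
  rfl

lemma pvLetters_cons_char (cs : List Char) (a b : Int) (c : Char) (hab : a < b)
    (hg : PySem.List.pyGet? cs a = some c) (hc : pvIsChar c = true) :
    pvLetters cs a b = c :: pvLetters cs (a + 1) b := by
  unfold pvLetters
  rw [PySem.List.pyRange_one_cons hab]
  simp [hg, hc]

lemma pvLetters_cons_skip (cs : List Char) (a b : Int) (c : Char) (hab : a < b)
    (hg : PySem.List.pyGet? cs a = some c) (hc : pvIsChar c = false) :
    pvLetters cs a b = pvLetters cs (a + 1) b := by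
  unfold pvLetters
  rw [PySem.List.pyRange_one_cons hab]
  simp [hg, hc]

-- phase 2 of A's loop: once tmp is nonempty, the loop collects letters until the first digit
lemma pvPhase2 (cs : List Char) : ∀ (k : Nat) (i : Int) (tmp : List Char),
    ((cs.length : Int) - i).toNat = k → tmp ≠ [] → -(cs.length : Int) ≤ i → i ≤ (cs.length : Int) →
    parseVarLoop cs tmp i = (tmp ++ pvLetters cs i (pvEnd cs i), pvEnd cs i) := by
  intro k
  induction k with
  | zero =>
    intro i tmp hk _ _ hhi
    have hi : i = (cs.length : Int) := by omega
    subst hi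
    rw [parseVarLoop]
    rw [dif_neg (lt_irrefl _)]
    rw [pvEnd_at_len, pvLetters_nil cs _ _ (le_refl _)]
    simp
  | succ k ih =>
    intro i tmp hk htmp hlo hhi
    have hlt : i < (cs.length : Int) := by omega
    obtain ⟨c, hg⟩ := pvGet_some cs i hlo hlt
    have hda : pvDigitAt cs i = pvIsDigit c := by simp [pvDigitAt, hg]
    rw [parseVarLoop]
    rw [dif_pos hlt]
    simp only [hg]
    by_cases hc : pvIsChar c = true
    · simp only [hc, if_pos]
      have hnd : pvDigitAt cs i = false := by rw [hda]; exact pvChar_not_digit c hc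
      have he : pvEnd cs i = pvEnd cs (i + 1) := pvEnd_of_not_digit cs i hlt hnd
      have hb := pvEnd_bounds cs (i + 1) (by omega)
      rw [ih (i + 1) (tmp ++ [c]) (by omega) (by simp) (by omega) (by omega)]
      rw [he, pvLetters_cons_char cs i (pvEnd cs (i + 1)) c (by omega) hg hc]
      simp
    · rw [Bool.not_eq_true] at hc
      simp only [hc, Bool.false_eq_true, if_false]
      have hnil : (tmp.length != 0) = true := by
        cases tmp with
        | nil => exact absurd rfl htmp
        | cons x xs => simp
      by_cases hd : pvIsDigit c = true
      · simp only [hd, hnil, Bool.and_self, if_pos]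
        have he : pvEnd cs i = i := pvEnd_of_digit cs i hlt (by rw [hda]; exact hd)
        rw [he, pvLetters_nil cs i i (le_refl _)]
        simp
      · rw [Bool.not_eq_true] at hd
        simp only [hd, Bool.false_and, Bool.false_eq_true, if_false]
        have he : pvEnd cs i = pvEnd cs (i + 1) := pvEnd_of_not_digit cs i hlt (by rw [hda]; exact hd)
        have hb := pvEnd_bounds cs (i + 1) (by omega)
        rw [ih (i + 1) tmp (by omega) htmp (by omega) (by omega)]
        rw [he, pvLetters_cons_skip cs i (pvEnd cs (i + 1)) c (by omega) hg hc]

-- phase 1: with tmp still empty, the loop skips to the first letter, then behaves as phase 2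
lemma pvPhase1 (cs : List Char) : ∀ (k : Nat) (j : Int),
    ((cs.length : Int) - j).toNat = k → -(cs.length : Int) ≤ j → j ≤ (cs.length : Int) →
    parseVarLoop cs [] j =
      match (PySem.List.pyRange j (cs.length : Int) 1).find? (pvCharAt cs) with
      | none => ([], (cs.length : Int))
      | some first => (pvLetters cs j (pvEnd cs (first + 1)), pvEnd cs (first + 1)) := by
  intro k
  induction k with
  | zero =>
    intro j hk hlo hhi
    have hj : j = (cs.length : Int) := by omega
    subst hj
    rw [parseVarLoop]
    rw [dif_neg (lt_irrefl _)]
    rw [PySem.List.pyRange_one_eq_nil (le_refl _)]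
    rfl
  | succ k ih =>
    intro j hk hlo hhi
    have hlt : j < (cs.length : Int) := by omega
    obtain ⟨c, hg⟩ := pvGet_some cs j hlo hlt
    have hca : pvCharAt cs j = pvIsChar c := by simp [pvCharAt, hg]
    rw [parseVarLoop]
    rw [dif_pos hlt]
    simp only [hg]
    rw [PySem.List.pyRange_one_cons hlt]
    by_cases hc : pvIsChar c = true
    · rw [List.find?_cons_of_pos (by rw [hca]; exact hc)]
      simp only [hc, if_pos]
      have hb := pvEnd_bounds cs (j + 1) (by omega)
      rw [List.nil_append]
      rw [pvPhase2 cs ((cs.length : Int) - (j + 1)).toNat (j + 1) [c] rfl (by simp) (by omega) (by omega)]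
      rw [pvLetters_cons_char cs j (pvEnd cs (j + 1)) c (by omega) hg hc]
      simp
    · rw [List.find?_cons_of_neg (by simp [hca, hc])]
      rw [Bool.not_eq_true] at hc
      simp only [hc, Bool.false_eq_true, if_false, List.length_nil, bne_self_eq_false,
        Bool.and_false]
      rw [ih (j + 1) (by omega) (by omega) (by omega)]
      cases hf : (PySem.List.pyRange (j + 1) (cs.length : Int) 1).find? (pvCharAt cs) with
      | none => rfl
      | some first =>
        have hm := List.mem_of_find?_eq_some hf
        rw [PySem.List.mem_pyRange_one] at hm
        have hb := pvEnd_bounds cs (first + 1) (by omega)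
        dsimp only
        rw [pvLetters_cons_skip cs j (pvEnd cs (first + 1)) c (by omega) hg hc]

-- list-level form of the claim; parseVar / parseVar_alt are definitionally these bodies at cs = s.toList
lemma pvMainList (cs : List Char) (start : Int) (hPre : -(cs.length : Int) ≤ start) :
    (match parseVarLoop cs [] start with
     | (tmp, st) => (String.mk tmp, st - (tmp.length : Int))) =
    (if start ≥ (cs.length : Int) then ("", start)
     else
       match (PySem.List.pyRange start (cs.length : Int) 1).find? (pvCharAt cs) with
       | none => ("", (cs.length : Int))
       | some first =>
         let e := ((PySem.List.pyRange (first + 1) (cs.length : Int) 1).find? (pvDigitAt cs)).getD (cs.length : Int)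
         let tmp := pvLetters cs start e
         (String.mk tmp, e - (tmp.length : Int))) := by
  by_cases hge : (cs.length : Int) ≤ start
  · rw [parseVarLoop]
    rw [dif_neg (not_lt.mpr hge)]
    rw [if_pos hge]
    simp
    rfl
  · have hlt : start < (cs.length : Int) := lt_of_not_ge hge
    rw [pvPhase1 cs ((cs.length : Int) - start).toNat start rfl hPre (le_of_lt hlt)]
    rw [if_neg hge]
    cases hf : (PySem.List.pyRange start (cs.length : Int) 1).find? (pvCharAt cs) with
    | none => simp; rfl
    | some first => simp [pvEnd]

-- ===== VERDICT =====
theorem parseVar_spec : Claim_equal_parseVar := by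
  intro s start _ hPre
  unfold Spec_parseVar parseVar parseVar_alt
  exact pvMainList s.toList start hPre
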